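-- pv_equiv track=rewrite | github.com/Unforgettableeternalproject/U.E.P-s-Core | train/nlp/quick_add_data.py | tokenize_english
-- ===== SOURCE A (Python) =====
-- from typing import List, Dict, Any
--
-- def tokenize_english(text: str) -> List[str]:
--     """
--     Simple English tokenization (split by whitespace and punctuation)
--
--     Note: This is a simplified version. For production, consider using
--     spaCy or NLTK for more robust tokenization.
--     """
--     tokens = []
--     current_token = ""
--
--     for char in text:
--         if char.isspace():
--             if current_token:
--                 tokens.append(current_token)
--                 current_token = ""
--         elif char.isalnum() or char in "'-":
--             current_token += char
--         else:
--             if current_token: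
--                 tokens.append(current_token)
--                 current_token = ""
--             tokens.append(char)
--
--     if current_token:
--         tokens.append(current_token)
--
--     return tokens
-- ===== SOURCE B (Python) =====
-- from itertools import groupby
--
-- def _key(c):
--     if c.isspace():
--         return 0
--     if c.isalnum() or c in "'-":
--         return 1
--     return 2
--
-- def tokenize_english(text: str):
--     tokens = []
--     for k, g in groupby(text, key=_key):
--         if k == 1:
--             tokens.append(''.join(g))
--         elif k == 2:
--             tokens.extend(g)
--     return tokens
-- ===== Notes on version B (the rewrite author's own statement) =====
-- stated objective: idiomatic
-- what changed: Replaced A's char-by-char state machine (mutable current_token with flush logic in three branches) by grouping the text into maximal runs of equal category (space/token/punct) with itertools.groupby and dispatching once per run.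
import Mathlib
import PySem

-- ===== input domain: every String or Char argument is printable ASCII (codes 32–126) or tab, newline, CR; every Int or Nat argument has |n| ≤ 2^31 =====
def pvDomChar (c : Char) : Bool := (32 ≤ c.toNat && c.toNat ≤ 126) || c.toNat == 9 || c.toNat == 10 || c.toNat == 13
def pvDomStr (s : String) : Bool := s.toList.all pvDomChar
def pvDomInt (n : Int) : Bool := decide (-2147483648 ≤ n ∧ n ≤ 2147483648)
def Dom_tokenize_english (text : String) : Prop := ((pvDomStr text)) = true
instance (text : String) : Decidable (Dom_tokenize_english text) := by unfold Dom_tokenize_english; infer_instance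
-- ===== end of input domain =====

-- B replaces A's char-by-char state machine by grouping the text into maximal
-- runs of equal category (space/token/punct) and dispatching once per run
-- (itertools.groupby in Python); objective: idiomatic, same cost.

-- ===== PORT A =====
-- A's loop: state = (tokens so far, current_token as List Char)
def tokA (tokens : List String) (cur : List Char) : List Char → List String
  | [] => if cur.isEmpty then tokens else tokens ++ [String.mk cur]
  | c :: cs =>
    if PySem.Chars.isspace c then
      tokA (if cur.isEmpty then tokens else tokens ++ [String.mk cur]) [] cs
    else if PySem.Chars.isalnum c || c == '\'' || c == '-' then
      tokA tokens (cur ++ [c]) cs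
    else
      tokA ((if cur.isEmpty then tokens else tokens ++ [String.mk cur]) ++ [String.mk [c]]) [] cs

def tokenize_english (text : String) : List String :=
  tokA [] [] text.toList

-- ===== PORT B =====
-- B's key function: 0 = space, 1 = token char, 2 = punctuation
def keyB (c : Char) : Nat :=
  if PySem.Chars.isspace c then 0
  else if PySem.Chars.isalnum c || c == '\'' || c == '-' then 1
  else 2

-- itertools.groupby: maximal runs of chars with equal key
def groupRuns : List Char → List (List Char)
  | [] => []
  | c :: cs =>
    (c :: cs.takeWhile (fun d => keyB d == keyB c)) ::
      groupRuns (cs.dropWhile (fun d => keyB d == keyB c))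
  termination_by l => l.length
  decreasing_by
    simpa using Nat.lt_succ_of_le (List.length_dropWhile_le _ _)

-- the loop body: what B appends for one (key, group) pair
def handleB (run : List Char) : List String :=
  match run with
  | [] => []
  | c :: _ =>
    if keyB c = 0 then []
    else if keyB c = 1 then [String.mk run]
    else run.map (fun d => String.mk [d])

def tokenize_english_alt (text : String) : List String :=
  (groupRuns text.toList).flatMap handleB

-- ===== PRECONDITION & SPEC =====
def Spec_tokenize_english (text : String) (out : List String) : Prop := out = tokenize_english_alt text
instance (text : String) (out : List String) : Decidable (Spec_tokenize_english text out) := by unfold Spec_tokenize_english; infer_instance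

-- ===== CLAIM (what is proved, stated in full; the proofs are below) =====
def Claim_equal_tokenize_english : Prop := ∀ (text : String), Dom_tokenize_english text → Spec_tokenize_english text (tokenize_english text)

-- ===== LEMMAS AND PROOFS =====

-- A's tokens parameter is a pure accumulator
theorem tokA_acc (cs : List Char) : ∀ (tokens : List String) (cur : List Char),
    tokA tokens cur cs = tokens ++ tokA [] cur cs := by
  induction cs with
  | nil => intro tokens cur; simp only [tokA]; split <;> simp
  | cons c cs ih =>
    intro tokens cur
    simp only [tokA]
    split_ifs <;> rw [ih, ih] <;> simp <;> (conv_rhs => rw [ih]) <;> simp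

def flushA (cur : List Char) : List String :=
  if cur.isEmpty then [] else [String.mk cur]

-- a run of whitespace with empty current token is skipped
theorem run_space : ∀ (ds rest : List Char), (∀ d ∈ ds, keyB d = 0) →
    tokA [] [] (ds ++ rest) = tokA [] [] rest := by
  intro ds
  induction ds with
  | nil => intro rest _; simp
  | cons d ds ih =>
    intro rest h
    have hd : PySem.Chars.isspace d = true := by
      have := h d (by simp); unfold keyB at this
      by_contra hc; simp [hc] at this; split at this <;> simp_all
    simp only [List.cons_append, tokA, hd, if_pos]
    simpa using ih rest (fun d hm => h d (by simp [hm]))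

-- a run of token chars extends the current token
theorem run_token : ∀ (ds : List Char), ∀ (rest cur : List Char), (∀ d ∈ ds, keyB d = 1) →
    tokA [] cur (ds ++ rest) = tokA [] (cur ++ ds) rest := by
  intro ds
  induction ds with
  | nil => intro rest cur _; simp
  | cons d ds ih =>
    intro rest cur h
    have hd1 := h d (by simp)
    have hsp : PySem.Chars.isspace d = false := by
      by_contra hc; simp at hc; simp [keyB, hc] at hd1
    have hal : (PySem.Chars.isalnum d || d == '\'' || d == '-') = true := by
      by_contra hc; simp only [Bool.not_eq_true] at hc; simp [keyB, hsp, hc] at hd1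
    simp only [List.cons_append, tokA, hsp, Bool.false_eq_true, if_false, hal, if_true]
    rw [ih rest (cur ++ [d]) (fun x hm => h x (by simp [hm]))]
    simp

-- a run of punctuation (with empty current token) emits one token per char
theorem run_punct : ∀ (ds rest : List Char), (∀ d ∈ ds, keyB d = 2) →
    tokA [] [] (ds ++ rest) =
      ds.map (fun d => String.mk [d]) ++ tokA [] [] rest := by
  intro ds
  induction ds with
  | nil => intro rest _; simp
  | cons d ds ih =>
    intro rest h
    have hd2 := h d (by simp)
    have hsp : PySem.Chars.isspace d = false := by
      by_contra hc; simp at hc; simp [keyB, hc] at hd2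
    cases hal : (PySem.Chars.isalnum d || d == '\'' || d == '-') with
    | true => simp [keyB, hsp, hal] at hd2
    | false =>
      simp only [List.cons_append, tokA, hsp, Bool.false_eq_true, if_false, hal,
        List.isEmpty_nil, if_true]
      rw [tokA_acc, ih rest (fun x hm => h x (by simp [hm]))]
      simp

-- when the next char (if any) is not a token char, the current token flushes out
theorem flush_out : ∀ (rest cur : List Char),
    (∀ r ∈ rest.head?, keyB r ≠ 1) →
    tokA [] cur rest = flushA cur ++ tokA [] [] rest := by
  intro rest cur h
  cases cur with
  | nil => simp [flushA]
  | cons a as =>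
    cases rest with
    | nil => simp [tokA, flushA]
    | cons r rs =>
      have hr := h r (by simp)
      simp only [tokA, List.isEmpty_cons, List.isEmpty_nil, if_false, if_true,
        Bool.false_eq_true, flushA]
      split_ifs with h1 h2
      · rw [tokA_acc, tokA_acc]; simp
      · exact absurd (by simp [keyB, h1, h2]) hr
      · rw [tokA_acc, tokA_acc]; simp [tokA_acc rs [String.mk [r]] []]

theorem head_dropWhile_false {p : Char → Bool} : ∀ (l : List Char) (r : Char) (rs : List Char),
    l.dropWhile p = r :: rs → p r = false := by
  intro l
  induction l with
  | nil => intro r rs h; simp at h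
  | cons c cs ih =>
    intro r rs h
    by_cases hc : p c = true
    · rw [List.dropWhile_cons_of_pos hc] at h; exact ih r rs h
    · rw [List.dropWhile_cons_of_neg hc] at h
      cases h; simpa using hc

theorem main_eq : ∀ (n : Nat) (cs : List Char), cs.length ≤ n →
    tokA [] [] cs = (groupRuns cs).flatMap handleB := by
  intro n
  induction n with
  | zero =>
    intro cs h
    have : cs = [] := by cases cs <;> simp_all
    subst this; simp [tokA, groupRuns]
  | succ n ih =>
    intro cs h
    cases cs with
    | nil => simp [tokA, groupRuns]
    | cons c cs =>
      rw [groupRuns]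
      set tk := cs.takeWhile (fun d => keyB d == keyB c) with htk
      set rest := cs.dropWhile (fun d => keyB d == keyB c) with hrest
      have hsplit : c :: cs = (c :: tk) ++ rest := by
        simp [htk, hrest]
      have hmem : ∀ d ∈ c :: tk, keyB d = keyB c := by
        intro d hd
        rcases List.mem_cons.mp hd with h | h
        · rw [h]
        · simpa using List.mem_takeWhile_imp h
      have hrestlen : rest.length ≤ n := by
        have := List.length_dropWhile_le (fun d => keyB d == keyB c) cs
        rw [hrest]; simp at h; omega
      have hih := ih rest hrestlen
      have hheadrest : ∀ r ∈ rest.head?, (keyB r == keyB c) = false := by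
        intro r hr
        cases hre : rest with
        | nil => simp [hre] at hr
        | cons r' rs' =>
          simp [hre] at hr; subst hr
          exact head_dropWhile_false cs r' rs' (hrest.symm.trans hre)
      rw [hsplit]
      have hkey3 : keyB c = 0 ∨ keyB c = 1 ∨ keyB c = 2 := by
        unfold keyB; split_ifs <;> simp
      rcases hkey3 with hk | hk | hk
      · -- whitespace run: emits nothing
        rw [run_space (c :: tk) rest (fun d hd => (hmem d hd).trans hk), hih]
        simp [handleB, hk]
      · -- token run: one joined token
        rw [run_token (c :: tk) rest [] (fun d hd => (hmem d hd).trans hk)]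
        simp only [List.nil_append]
        rw [flush_out rest (c :: tk) (by
          intro r hr
          have := hheadrest r hr
          simp [hk] at this ⊢; omega)]
        rw [hih]
        simp [handleB, hk, flushA]
      · -- punctuation run: one token per char
        rw [run_punct (c :: tk) rest (fun d hd => (hmem d hd).trans hk), hih]
        simp [handleB, hk]

-- ===== VERDICT (by name: the statement is the Claim_ definition above) =====
theorem tokenize_english_spec : Claim_equal_tokenize_english := by
  intro text _
  unfold Spec_tokenize_english tokenize_english tokenize_english_alt
  exact main_eq text.toList.length text.toList le_rfl
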